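-- pv_equiv track=rewrite | github.com/itornaza/lexarithm | lexarithm.py | to_greek_numeral
-- ===== SOURCE A (Python) =====
-- def to_greek_numeral(n: int) -> str:
--     if n <= 0:
--         return "0"
--     thousands = {1:'͵α',2:'͵β',3:'͵γ',4:'͵δ',5:'͵ε',6:'͵ϝ',7:'͵ζ',8:'͵η',9:'͵θ'}
--     units = {
--         1:'α',2:'β',3:'γ',4:'δ',5:'ε',6:'ϝ',7:'ζ',8:'η',9:'θ',
--         10:'ι',20:'κ',30:'λ',40:'μ',50:'ν',60:'ξ',70:'ο',80:'π',90:'ϙ',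
--         100:'ρ',200:'σ',300:'τ',400:'υ',500:'φ',600:'χ',700:'ψ',800:'ω',900:'ϡ'
--     }
--     s = ""
--     if n >= 1000:
--         s += thousands.get(n // 1000, "")
--         n %= 1000
--     for val in sorted(units.keys(), reverse=True):
--         while n >= val:
--             s += units[val]
--             n -= val
--     return s + (" " if len(s) > 1 else "")
-- ===== SOURCE B (Python) =====
-- THOUSANDS = {1:'͵α',2:'͵β',3:'͵γ',4:'͵δ',5:'͵ε',6:'͵ϝ',7:'͵ζ',8:'͵η',9:'͵θ'}
-- UNITS = {
--     1:'α',2:'β',3:'γ',4:'δ',5:'ε',6:'ϝ',7:'ζ',8:'η',9:'θ',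
--     10:'ι',20:'κ',30:'λ',40:'μ',50:'ν',60:'ξ',70:'ο',80:'π',90:'ϙ',
--     100:'ρ',200:'σ',300:'τ',400:'υ',500:'φ',600:'χ',700:'ψ',800:'ω',900:'ϡ'
-- }
--
-- def _digits(r):
--     # positional lookup of the three digits of 0 <= r < 1000, skipping zeros
--     s = ""
--     h, t, u = r // 100, (r % 100) // 10, r % 10
--     if h:
--         s += UNITS[h * 100]
--     if t:
--         s += UNITS[t * 10]
--     if u:
--         s += UNITS[u]
--     return s
--
-- def to_greek_numeral(n: int) -> str:
--     if n <= 0: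
--         return "0"
--     s = THOUSANDS.get(n // 1000, "") + _digits(n % 1000)
--     return s + (" " if len(s) > 1 else "")
-- ===== Notes on version B (the rewrite author's own statement) =====
-- stated objective: simpler
-- what changed: Replaces A's sorted-keys greedy repeated-subtraction loop with direct positional digit extraction (thousands/hundreds/tens/units) and one dict lookup per nonzero digit.
import Mathlib
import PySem

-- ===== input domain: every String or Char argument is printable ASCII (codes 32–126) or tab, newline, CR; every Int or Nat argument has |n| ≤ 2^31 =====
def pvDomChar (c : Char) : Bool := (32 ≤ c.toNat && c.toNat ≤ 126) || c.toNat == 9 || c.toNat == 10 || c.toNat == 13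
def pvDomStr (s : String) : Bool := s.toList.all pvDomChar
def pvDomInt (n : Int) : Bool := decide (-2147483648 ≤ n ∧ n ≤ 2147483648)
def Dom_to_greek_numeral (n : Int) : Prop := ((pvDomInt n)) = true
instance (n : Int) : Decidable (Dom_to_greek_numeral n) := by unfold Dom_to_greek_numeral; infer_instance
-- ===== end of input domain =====

-- B replaces A's sorted-keys greedy repeated-subtraction loop with direct positional digit lookups (simpler).

-- the two literal tables of the Python source, shared by both ports
def pvThousands : PySem.Dict Int String :=
  PySem.Dict.ofList [(1,"͵α"),(2,"͵β"),(3,"͵γ"),(4,"͵δ"),(5,"͵ε"),(6,"͵ϝ"),(7,"͵ζ"),(8,"͵η"),(9,"͵θ")]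
def pvUnits : PySem.Dict Int String :=
  PySem.Dict.ofList [(1,"α"),(2,"β"),(3,"γ"),(4,"δ"),(5,"ε"),(6,"ϝ"),(7,"ζ"),(8,"η"),(9,"θ"),
    (10,"ι"),(20,"κ"),(30,"λ"),(40,"μ"),(50,"ν"),(60,"ξ"),(70,"ο"),(80,"π"),(90,"ϙ"),
    (100,"ρ"),(200,"σ"),(300,"τ"),(400,"υ"),(500,"φ"),(600,"χ"),(700,"ψ"),(800,"ω"),(900,"ϡ")]

-- ===== PORT A =====
-- the inner `while n >= val: s += units[val]; n -= val`; fuel (n.toNat+1) is a totality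
-- device only: every key val is ≥ 1, so the loop runs at most n times
def pvWhileFuel (u : String) (val : Int) : Nat → String → Int → String × Int
  | 0, s, n => (s, n)
  | f+1, s, n => if val ≤ n then pvWhileFuel u val f (s ++ u) (n - val) else (s, n)

def pvWhile (u : String) (val : Int) (s : String) (n : Int) : String × Int :=
  pvWhileFuel u val (n.toNat + 1) s n

def to_greek_numeral (n : Int) : String :=
  if n ≤ 0 then "0"
  else
    let sn : String × Int :=
      if n ≥ 1000 then
        ("" ++ PySem.Dict.getD pvThousands (PySem.Int.floordiv n 1000) "", PySem.Int.mod n 1000)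
      else ("", n)
    let keys := PySem.List.sorted (PySem.Dict.keys pvUnits) (fun x => x) (reverse := true)
    let sn2 := keys.foldl (fun st val => pvWhile (PySem.Dict.getD pvUnits val "") val st.1 st.2) sn
    sn2.1 ++ (if PySem.Str.len sn2.1 > 1 then " " else "")

-- ===== PORT B =====
def pvDigits (r : Int) : String :=
  let h := PySem.Int.floordiv r 100
  let t := PySem.Int.floordiv (PySem.Int.mod r 100) 10
  let u := PySem.Int.mod r 10
  let s := ""
  let s := if h ≠ 0 then s ++ PySem.Dict.getD pvUnits (h * 100) "" else s
  let s := if t ≠ 0 then s ++ PySem.Dict.getD pvUnits (t * 10) "" else s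
  let s := if u ≠ 0 then s ++ PySem.Dict.getD pvUnits u "" else s
  s

def to_greek_numeral_alt (n : Int) : String :=
  if n ≤ 0 then "0"
  else
    let s := PySem.Dict.getD pvThousands (PySem.Int.floordiv n 1000) "" ++
             pvDigits (PySem.Int.mod n 1000)
    s ++ (if PySem.Str.len s > 1 then " " else "")

-- ===== PRECONDITION & SPEC =====
def Spec_to_greek_numeral (n : Int) (out : String) : Prop := out = to_greek_numeral_alt n
instance (n : Int) (out : String) : Decidable (Spec_to_greek_numeral n out) := by unfold Spec_to_greek_numeral; infer_instance

-- ===== CLAIM (what is proved, stated in full; the proofs are below) =====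
def Claim_equal_to_greek_numeral : Prop := ∀ (n : Int), Dom_to_greek_numeral n → Spec_to_greek_numeral n (to_greek_numeral n)

-- ===== LEMMAS AND PROOFS =====

-- the while-loop only appends to s: factor the accumulator out
theorem pvWhileFuel_append (u : String) (val : Int) (f : Nat) :
    ∀ (s : String) (n : Int),
      pvWhileFuel u val f s n
        = (s ++ (pvWhileFuel u val f "" n).1, (pvWhileFuel u val f "" n).2) := by
  induction f with
  | zero => intro s n; simp [pvWhileFuel]
  | succ f ih =>
      intro s n
      simp only [pvWhileFuel]
      by_cases h : val ≤ n
      · simp only [if_pos h]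
        rw [ih (s ++ u), ih ("" ++ u)]
        simp [String.append_assoc]
      · simp [if_neg h]

theorem pvWhile_append (u : String) (val : Int) (s : String) (n : Int) :
    pvWhile u val s n = (s ++ (pvWhile u val "" n).1, (pvWhile u val "" n).2) := by
  unfold pvWhile
  exact pvWhileFuel_append u val (n.toNat + 1) s n

-- the whole units loop only appends to s
theorem foldl_while_append (keys : List Int) :
    ∀ (s : String) (n : Int),
      keys.foldl (fun st val => pvWhile (PySem.Dict.getD pvUnits val "") val st.1 st.2) (s, n)
        = (s ++ (keys.foldl (fun st val => pvWhile (PySem.Dict.getD pvUnits val "") val st.1 st.2) ("", n)).1,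
           (keys.foldl (fun st val => pvWhile (PySem.Dict.getD pvUnits val "") val st.1 st.2) ("", n)).2) := by
  induction keys with
  | nil => intro s n; simp
  | cons k ks ih =>
      intro s n
      simp only [List.foldl_cons]
      rw [pvWhile_append _ _ s n, pvWhile_append _ _ "" n]
      rw [ih (s ++ _) _, ih ("" ++ _) _]
      simp [String.append_assoc]

-- on every residue 0 ≤ r < 1000 the greedy loop produces exactly the positional digit string
set_option maxRecDepth 100000 in
set_option maxHeartbeats 4000000 in
theorem loop_eq_digits : ∀ m : Nat, m < 1000 →
    ((PySem.List.sorted (PySem.Dict.keys pvUnits) (fun x => x) (reverse := true)).foldl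
        (fun st val => pvWhile (PySem.Dict.getD pvUnits val "") val st.1 st.2) ("", (m : Int))).1
      = pvDigits (m : Int) := by
  decide

theorem thousands_getD_zero : PySem.Dict.getD pvThousands 0 "" = "" := by decide

theorem mod_small (n : Int) (h0 : 0 < n) (h1 : n < 1000) : PySem.Int.mod n 1000 = n := by
  rw [PySem.Int.mod_eq_emod_of_pos (show (0:Int) < 1000 by norm_num)]; omega

theorem floordiv_small (n : Int) (h0 : 0 < n) (h1 : n < 1000) : PySem.Int.floordiv n 1000 = 0 := by
  rw [PySem.Int.floordiv_eq_ediv_of_pos (show (0:Int) < 1000 by norm_num)]; omega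

-- ===== VERDICT (by name: the statement is the Claim_ definition above) =====
theorem to_greek_numeral_spec : Claim_equal_to_greek_numeral := by
  intro n _
  unfold Spec_to_greek_numeral to_greek_numeral to_greek_numeral_alt
  by_cases hle : n ≤ 0
  · simp [hle]
  · simp only [if_neg hle]
    have hpos : 0 < n := by omega
    by_cases hth : n ≥ 1000
    · simp only [if_pos hth]
      have hr0 : 0 ≤ PySem.Int.mod n 1000 := PySem.Int.mod_nonneg n (by omega)
      have hr1 : PySem.Int.mod n 1000 < 1000 := PySem.Int.mod_lt n (by omega)
      rw [foldl_while_append]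
      have hcast : PySem.Int.mod n 1000 = ((PySem.Int.mod n 1000).toNat : Int) := by omega
      rw [hcast, loop_eq_digits (PySem.Int.mod n 1000).toNat (by omega)]
      simp
    · simp only [if_neg hth]
      rw [foldl_while_append,
        floordiv_small n hpos (by omega), thousands_getD_zero, mod_small n hpos (by omega)]
      have hcast : n = (n.toNat : Int) := by omega
      rw [hcast, loop_eq_digits n.toNat (by omega)]
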